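-- pv_equiv track=rewrite | github.com/lacoco-lab/decompiling_transformers | crasp/scripts/patching/patching_data.py | get_next_tokens
-- ===== SOURCE A (Python) =====
-- def get_next_tokens(pos_sample):
--     d_occurred = False
--     output_tokens = []
--     for letter in pos_sample:
--         if letter == "d":
--             d_occurred = True
--
--         if not d_occurred:
--             output_tokens.append(set(["a", "b", "d"]))
--         else:
--             output_tokens.append(set(["b", "c", "<eos>"]))
--
--     return output_tokens
-- ===== SOURCE B (Python) =====
-- def get_next_tokens(pos_sample):
--     try:
--         cut = pos_sample.index("d")
--     except ValueError:
--         cut = len(pos_sample)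
--     return [{"a", "b", "d"} for _ in range(cut)] + \
--            [{"b", "c", "<eos>"} for _ in range(len(pos_sample) - cut)]
-- ===== Notes on version B (the rewrite author's own statement) =====
-- stated objective: simpler
-- what changed: Replaces the flag-carrying single pass with an index-then-two-blocks decomposition: find the first 'd' (or the length if absent) and concatenate a block of {'a','b','d'} sets with a block of {'b','c','<eos>'} sets.
import Mathlib
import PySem

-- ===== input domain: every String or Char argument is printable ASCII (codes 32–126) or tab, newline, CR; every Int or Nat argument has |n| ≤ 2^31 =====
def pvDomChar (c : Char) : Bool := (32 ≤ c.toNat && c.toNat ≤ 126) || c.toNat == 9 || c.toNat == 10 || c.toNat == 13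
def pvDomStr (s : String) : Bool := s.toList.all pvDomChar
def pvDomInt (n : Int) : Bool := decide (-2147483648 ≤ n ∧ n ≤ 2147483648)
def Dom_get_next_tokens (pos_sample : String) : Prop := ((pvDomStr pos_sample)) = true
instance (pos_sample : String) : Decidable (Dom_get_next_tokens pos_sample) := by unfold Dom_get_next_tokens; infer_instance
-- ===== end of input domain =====

-- B replaces A's flag-carrying single pass by an index-then-two-blocks decomposition (objective: simpler).
-- ===== PORT A =====
-- loop over the letters, carrying the d_occurred flag and appending one set per letter
def get_next_tokens_loop : List Char → Bool → List (List String)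
  | [], _ => []
  | letter :: rest, d_occurred =>
      let d_occurred := if letter == 'd' then true else d_occurred
      (if !d_occurred then PySem.Set.ofList ["a", "b", "d"]
       else PySem.Set.ofList ["b", "c", "<eos>"]) :: get_next_tokens_loop rest d_occurred

def get_next_tokens (pos_sample : String) : List (List String) :=
  get_next_tokens_loop pos_sample.toList false

-- ===== PORT B =====
def get_next_tokens_alt (pos_sample : String) : List (List String) :=
  let cut := (pos_sample.toList.findIdx? (· == 'd')).getD pos_sample.toList.length
  List.replicate cut (PySem.Set.ofList ["a", "b", "d"]) ++
    List.replicate (pos_sample.toList.length - cut) (PySem.Set.ofList ["b", "c", "<eos>"])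

-- ===== PRECONDITION & SPEC =====
def Spec_get_next_tokens (pos_sample : String) (out : List (List String)) : Prop := out = get_next_tokens_alt pos_sample
instance (pos_sample : String) (out : List (List String)) : Decidable (Spec_get_next_tokens pos_sample out) := by unfold Spec_get_next_tokens; infer_instance

-- ===== CLAIM (what is proved, stated in full; the proofs are below) =====
def Claim_equal_get_next_tokens : Prop := ∀ (pos_sample : String), Dom_get_next_tokens pos_sample → Spec_get_next_tokens pos_sample (get_next_tokens pos_sample)

-- ===== LEMMAS AND PROOFS =====
theorem loop_true (xs : List Char) :
    get_next_tokens_loop xs true = List.replicate xs.length (PySem.Set.ofList ["b", "c", "<eos>"]) := by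
  induction xs with
  | nil => rfl
  | cons c rest ih => simp [get_next_tokens_loop, ih, List.replicate_succ]

theorem loop_false (xs : List Char) :
    get_next_tokens_loop xs false =
      List.replicate ((xs.findIdx? (· == 'd')).getD xs.length) (PySem.Set.ofList ["a", "b", "d"]) ++
        List.replicate (xs.length - (xs.findIdx? (· == 'd')).getD xs.length)
          (PySem.Set.ofList ["b", "c", "<eos>"]) := by
  induction xs with
  | nil => rfl
  | cons c rest ih =>
    by_cases h : c = 'd'
    · subst h
      simp [get_next_tokens_loop, List.findIdx?_cons, loop_true, List.replicate_succ]
    · have hc : (c == 'd') = false := by simp [h]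
      rw [get_next_tokens_loop, List.findIdx?_cons]
      simp only [hc]
      rcases hf : rest.findIdx? (· == 'd') with _ | n
      · simp [hf, ih, List.replicate_succ]
      · simp [hf, ih, List.replicate_succ, Nat.succ_sub_succ]

-- ===== VERDICT (by name: the statement is the Claim_ definition above) =====
theorem get_next_tokens_spec : Claim_equal_get_next_tokens := by
  intro s _
  show get_next_tokens s = get_next_tokens_alt s
  simp [get_next_tokens, get_next_tokens_alt, loop_false]
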